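-- pv_equiv track=rewrite | github.com/kdeberk/advent-of-code | python2016/day11.py | solve
-- ===== SOURCE A (Python) =====
-- from itertools import combinations
--
-- def solve(puzzle):
--     def done(state):
--         for floor in state:
--             if floor < 3:
--                 return False
--         return True
--
--     def safe(state, floor):
--         nGens = 0
--         freeChip = False
--         for idx in range(1, len(state), 2):
--             if state[idx] == floor and state[idx+1] != floor:
--                 freeChip = True
--             if state[idx+1] == floor:
--                 nGens += 1
--         # Chips will be fried if their generator is on another floor and there is another generator on this floor.
--         return not (freeChip and 0 < nGens)
--
--     def digest(state):
--         ts = [state[0]] + sorted((state[idx], state[idx+1]) for idx in range(1, len(state), 2))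
--         return hash(str(ts))
--
--     def nexts(state):
--         ns = []
--
--         # pushIfSafe only checks src and dst floors.
--         def pushIfSafe(state, dst, src):
--             if safe(state, dst) and safe(state, src):
--                 ns.append(state)
--
--         # move moves the items at idxs one floor up or down.
--         def move(state, d, *idxs):
--             st = state[:]
--             st[0] += d
--             for idx in idxs:
--                 st[idx] += d
--             return st
--
--         hero = state[0]
--         idxs = [idx for idx in range(1, len(state)) if hero == state[idx]]
--         # Hero moves a single item up or down.
--         for idx in idxs:
--             if 0 < hero:
--                 pushIfSafe(move(state, -1, idx), hero-1, hero)
--             if hero < 3: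
--                 pushIfSafe(move(state,  1, idx), hero+1, hero)
--
--         # Hero moves two items up or down.
--         for c in combinations(idxs, 2):
--             a, b = c
--             if 0 < hero:
--                 pushIfSafe(move(state, -1, a, b), hero-1, hero)
--             if hero < 3:
--                 pushIfSafe(move(state,  1, a, b), hero+1, hero)
--         return ns
--
--     seen = set([])
--
--     q = [(0, puzzle)]
--     while 0 < len(q):
--         (steps, state) = q.pop(0)
--
--         if done(state):
--             return steps
--
--         steps += 1
--         for nxt in nexts(state):
--             d = digest(nxt)
--             if (d not in seen):
--                 q.append((steps, nxt))
--                 seen.add(d)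
-- ===== SOURCE B (Python) =====
-- from itertools import combinations
--
-- # Naive fixpoint (round) iteration instead of a FIFO queue: each round re-expands
-- # the ENTIRE discovered set to derive the next generation, checks the new states
-- # for the goal, and stops when a round adds nothing; seen-keys are canonical
-- # tuples; single/double cargos and both directions are enumerated uniformly.
-- def solve(puzzle):
--     def done(state):
--         return all(f >= 3 for f in state)
--
--     def safe(state, floor):
--         pairs = [(state[i], state[i + 1]) for i in range(1, len(state), 2)]
--         has_gen = any(g == floor for _, g in pairs)
--         exposed = any(c == floor and g != floor for c, g in pairs)
--         return not (has_gen and exposed)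
--
--     def key(state):
--         return (state[0], tuple(sorted((state[i], state[i + 1]) for i in range(1, len(state), 2))))
--
--     def nexts(state):
--         hero = state[0]
--         idxs = [i for i in range(1, len(state)) if state[i] == hero]
--         cargos = [[i] for i in idxs] + [list(c) for c in combinations(idxs, 2)]
--         ns = []
--         for cargo in cargos:
--             for d in (-1, 1):
--                 if (d < 0 and hero > 0) or (d > 0 and hero < 3):
--                     st = state[:]
--                     st[0] += d
--                     for i in cargo:
--                         st[i] += d
--                     if safe(st, hero + d) and safe(st, hero):
--                         ns.append(st)
--         return ns
--
--     seen = set()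
--     discovered = []   # every state ever found, oldest first
--     new = [puzzle]    # this round's generation
--     depth = 0
--     while new:
--         if any(done(s) for s in new):
--             return depth
--         discovered = discovered + new
--         nxt = []
--         for s in discovered:          # re-derive the closure step from the WHOLE set
--             for n in nexts(s):
--                 k = key(n)
--                 if k not in seen:
--                     seen.add(k)
--                     nxt.append(n)
--         new = nxt
--         depth += 1
--     return None
-- ===== Notes on version B (the rewrite author's own statement) =====
-- stated objective: alternative
-- what changed: Replaces the FIFO-queue BFS by naive fixpoint (round) iteration of the one-step successor image: each round re-expands the ENTIRE discovered set (no queue, no frontier-only expansion), the goal is checked on the round's new generation, and the search stops when a round adds nothing instead of when a queue empties; seen-keys are canonical tuples instead of hash(str(...)) digests and single/double cargos with both directions are enumerated uniformly.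
import Mathlib
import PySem

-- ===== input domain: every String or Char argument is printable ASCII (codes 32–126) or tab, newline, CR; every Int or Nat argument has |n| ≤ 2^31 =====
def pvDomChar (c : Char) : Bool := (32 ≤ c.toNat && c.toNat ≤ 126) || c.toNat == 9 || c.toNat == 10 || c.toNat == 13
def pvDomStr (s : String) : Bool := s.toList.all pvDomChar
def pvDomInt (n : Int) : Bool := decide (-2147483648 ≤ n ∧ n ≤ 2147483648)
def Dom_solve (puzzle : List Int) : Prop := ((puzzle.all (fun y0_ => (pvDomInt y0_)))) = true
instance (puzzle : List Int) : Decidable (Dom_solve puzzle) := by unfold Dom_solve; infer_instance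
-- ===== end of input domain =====

-- B replaces A's FIFO-queue BFS by naive fixpoint (round) iteration: each round
-- re-expands the ENTIRE discovered set, checks the new generation for the goal,
-- and stops when a round adds nothing; seen-keys are canonical tuples instead of
-- hash(str(...)) digests; objective: alternative formulation, same return value.

-- ===== PORT A =====
-- Shared canonical state helpers (used verbatim by both Pythons).
-- pairs (state[i], state[i+1]) for i in range(1, len(state), 2): exact for the
-- odd lengths admitted by Pre_; on excluded even lengths Python raises IndexError.
def pvPairs : List Int → List (Int × Int)
  | c :: g :: rest => (c, g) :: pvPairs rest
  | _ => []

-- done(state): all floors ≥ 3 (early-exit loop = List.all)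
def pvDone (state : List Int) : Bool := state.all (fun f => decide (3 ≤ f))

-- digest/key: Python's hash(str([state[0]] + sorted(pairs))) resp. the tuple
-- (state[0], tuple(sorted(pairs))) are modelled by the injective canonical value
-- itself (hash is run-randomized and collision-free on these inputs).
def pvCanon (state : List Int) : Int × List (Int × Int) :=
  (state.getD 0 0, PySem.List.sorted (pvPairs (state.drop 1)) (fun p => toLex p) false)

-- idxs = [idx for idx in range(1, len(state)) if hero == state[idx]]
def pvIdxs (state : List Int) (hero : Int) : List Nat :=
  (List.range' 1 (state.length - 1)).filter (fun i => state.getD i 0 == hero)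

-- move: copy, bump index 0 and each cargo index by d (indices are in range on every call A makes)
def pvMove (state : List Int) (d : Int) (cargo : List Nat) : List Int :=
  cargo.foldl (fun s i => s.set i (s.getD i 0 + d)) (state.set 0 (state.getD 0 0 + d))

-- itertools.combinations(idxs, 2)
def pvCombos2 : List Nat → List (Nat × Nat)
  | [] => []
  | x :: xs => xs.map (fun y => (x, y)) ++ pvCombos2 xs

-- A's safe: one pass accumulating (freeChip, nGens)
def pvSafeA (state : List Int) (floor : Int) : Bool :=
  let r := (pvPairs (state.drop 1)).foldl
    (fun (acc : Bool × Int) cg =>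
      (acc.1 || (cg.1 == floor && cg.2 != floor), acc.2 + if cg.2 == floor then 1 else 0))
    (false, 0)
  !(r.1 && decide (0 < r.2))

def pvPushIfSafe (st : List Int) (dst src : Int) (ns : List (List Int)) : List (List Int) :=
  if pvSafeA st dst && pvSafeA st src then ns ++ [st] else ns

-- A's nexts: singles loop, then pairs loop, each pushing down- then up-moves
def pvNextsA (state : List Int) : List (List Int) :=
  let hero := state.getD 0 0
  let idxs := pvIdxs state hero
  let ns1 := idxs.foldl (fun ns idx =>
      let ns := if 0 < hero then pvPushIfSafe (pvMove state (-1) [idx]) (hero - 1) hero ns else ns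
      if hero < 3 then pvPushIfSafe (pvMove state 1 [idx]) (hero + 1) hero ns else ns) []
  (pvCombos2 idxs).foldl (fun ns c =>
      let ns := if 0 < hero then pvPushIfSafe (pvMove state (-1) [c.1, c.2]) (hero - 1) hero ns else ns
      if hero < 3 then pvPushIfSafe (pvMove state 1 [c.1, c.2]) (hero + 1) hero ns else ns) ns1

-- fuel: totality device only; ≥ number of queue pops the Python loop performs
-- (pops ≤ 1 + inserted digests ≤ 1 + (range of floor values)^length, since every
-- reachable coordinate stays within [min 0 floors, max 3 floors]).
def pvFuel (puzzle : List Int) : Nat :=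
  let lo := puzzle.foldl min 0
  let hi := puzzle.foldl max 3
  (hi - lo + 1).toNat ^ puzzle.length + puzzle.length + 2

-- q.append((steps, nxt)) / seen.add(d) guarded by d not in seen
def pvStepA (steps : Int) (acc : List (Int × List Int) × PySem.Set (Int × List (Int × Int)))
    (nxt : List Int) : List (Int × List Int) × PySem.Set (Int × List (Int × Int)) :=
  let dg := pvCanon nxt
  if PySem.Set.contains acc.2 dg then acc
  else (acc.1 ++ [(steps, nxt)], PySem.Set.add acc.2 dg)

-- A's while-loop over the FIFO queue of (steps, state) pairs
def pvALoop : Nat → List (Int × List Int) → PySem.Set (Int × List (Int × Int)) → Option Int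
  | _, [], _ => none
  | 0, _ :: _, _ => none
  | fuel + 1, (steps, state) :: rest, seen =>
    if pvDone state then some steps
    else
      let p := (pvNextsA state).foldl (pvStepA (steps + 1)) (rest, seen)
      pvALoop fuel p.1 p.2

def solve (puzzle : List Int) : Option Int :=
  pvALoop (pvFuel puzzle) [(0, puzzle)] PySem.Set.empty

-- ===== PORT B =====
-- B's safe: pairs list, then two any-passes
def pvSafeB (state : List Int) (floor : Int) : Bool :=
  let pairs := pvPairs (state.drop 1)
  let hasGen := pairs.any (fun cg => cg.2 == floor)
  let exposed := pairs.any (fun cg => cg.1 == floor && cg.2 != floor)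
  !(hasGen && exposed)

-- B's nexts: uniform cargo list ([i] singles ++ [a,b] pairs), inner loop over d ∈ (-1, 1)
def pvNextsB (state : List Int) : List (List Int) :=
  let hero := state.getD 0 0
  let idxs := pvIdxs state hero
  let cargos := idxs.map (fun i => [i]) ++ (pvCombos2 idxs).map (fun c => [c.1, c.2])
  cargos.foldl (fun ns cargo =>
    [(-1 : Int), 1].foldl (fun ns d =>
      if (decide (d < 0) && decide (0 < hero)) || (decide (0 < d) && decide (hero < 3)) then
        let st := pvMove state d cargo
        if pvSafeB st (hero + d) && pvSafeB st hero then ns ++ [st] else ns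
      else ns) ns) []

-- result of scanning one generation for a done state (fuel-threaded)
inductive PvScan
  | found
  | out
  | clear (f : Nat)

-- any(done(s) for s in new), consuming one fuel per scanned state
def pvScan : Nat → List (List Int) → PvScan
  | f, [] => .clear f
  | 0, _ :: _ => .out
  | f + 1, s :: rest => if pvDone s then .found else pvScan f rest

-- termination helper for pvFixLoop (cited in decreasing_by)
theorem pvScan_clear_add (l : List (List Int)) : ∀ (fuel f' : Nat),
    pvScan fuel l = .clear f' → f' + l.length = fuel := by
  induction l with
  | nil =>
    intro fuel f' h
    simp only [pvScan, PvScan.clear.injEq] at h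
    simp [h]
  | cons s rest ih =>
    intro fuel f' h
    match fuel with
    | 0 => simp [pvScan] at h
    | f + 1 =>
      by_cases hd : pvDone s
      · simp [pvScan, hd] at h
      · simp only [pvScan, hd, Bool.false_eq_true, ite_false] at h
        have := ih f f' h
        simp [List.length_cons]; omega

theorem pvScan_clear_lt (fuel : Nat) (s : List Int) (rest : List (List Int)) (f' : Nat)
    (h : pvScan fuel (s :: rest) = .clear f') : f' < fuel := by
  have := pvScan_clear_add (s :: rest) fuel f' h
  simp [List.length_cons] at this; omega

-- seen.add(k) / nxt.append(n) guarded by k not in seen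
def pvStepB (acc : List (List Int) × PySem.Set (Int × List (Int × Int)))
    (n : List Int) : List (List Int) × PySem.Set (Int × List (Int × Int)) :=
  let k := pvCanon n
  if PySem.Set.contains acc.2 k then acc
  else (acc.1 ++ [n], PySem.Set.add acc.2 k)

-- the closure step: for s in discovered: for n in nexts(s): …
def pvExpandB (discovered : List (List Int))
    (acc : List (List Int) × PySem.Set (Int × List (Int × Int))) :
    List (List Int) × PySem.Set (Int × List (Int × Int)) :=
  discovered.foldl (fun a s => (pvNextsB s).foldl pvStepB a) acc

-- B's while-loop: scan the new generation for a done state, else append it to the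
-- discovered set and re-expand the WHOLE set into the next generation
def pvFixLoop (fuel : Nat) (discovered newGen : List (List Int)) (depth : Int)
    (seen : PySem.Set (Int × List (Int × Int))) : Option Int :=
  match newGen with
  | [] => none
  | s :: rest =>
    match h : pvScan fuel (s :: rest) with
    | .found => some depth
    | .out => none
    | .clear f' =>
      let all := discovered ++ s :: rest
      let p := pvExpandB all ([], seen)
      pvFixLoop f' all p.1 (depth + 1) p.2
termination_by fuel
decreasing_by exact pvScan_clear_lt _ _ _ _ h

def solve_alt (puzzle : List Int) : Option Int :=
  pvFixLoop (pvFuel puzzle) [] [puzzle] 0 PySem.Set.empty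

-- ===== PRECONDITION & SPEC =====
-- Pre_ excludes exactly the inputs on which the Python A raises IndexError (safe/digest
-- read state[idx+1] past the end): even-length puzzles that are not already solved and
-- whose hero floor matches some item floor, so that a move is attempted. A returns
-- normally on every other input, and all of those are admitted.
def Pre_solve (puzzle : List Int) : Prop :=
  puzzle.length % 2 = 1 ∨ (∀ f ∈ puzzle, 3 ≤ f) ∨ (∀ x ∈ puzzle.tail, x ≠ puzzle.headI)
instance (puzzle : List Int) : Decidable (Pre_solve puzzle) := by unfold Pre_solve; infer_instance

def pvWitness_solve : List Int := [0, 1, 0]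

def Spec_solve (puzzle : List Int) (out : Option Int) : Prop := out = solve_alt puzzle
instance (puzzle : List Int) (out : Option Int) : Decidable (Spec_solve puzzle out) := by unfold Spec_solve; infer_instance

-- ===== CLAIM (what is proved, stated in full; the proofs are below) =====
def Claim_equal_solve : Prop := ∀ (puzzle : List Int), Dom_solve puzzle → Pre_solve puzzle → Spec_solve puzzle (solve puzzle)

-- ===== LEMMAS AND PROOFS =====

-- proof-internal level-synchronous form of A's loop: the bridge between A's tagged
-- queue and B's round iteration
def pvLvLoop (fuel : Nat) (frontier : List (List Int)) (depth : Int)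
    (seen : PySem.Set (Int × List (Int × Int))) : Option Int :=
  match frontier with
  | [] => none
  | s :: rest =>
    match h : pvScan fuel (s :: rest) with
    | .found => some depth
    | .out => none
    | .clear f' =>
      let p := pvExpandB (s :: rest) ([], seen)
      pvLvLoop f' p.1 (depth + 1) p.2
termination_by fuel
decreasing_by exact pvScan_clear_lt _ _ _ _ h

theorem pvLvLoop_cons (fuel : Nat) (s : List Int) (rest : List (List Int)) (depth : Int)
    (seen : PySem.Set (Int × List (Int × Int))) :
    pvLvLoop fuel (s :: rest) depth seen =
      match pvScan fuel (s :: rest) with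
      | .found => some depth
      | .out => none
      | .clear f' =>
        pvLvLoop f' (pvExpandB (s :: rest) ([], seen)).1 (depth + 1) (pvExpandB (s :: rest) ([], seen)).2 := by
  rw [pvLvLoop]
  cases pvScan fuel (s :: rest) <;> rfl

theorem pvExpand_align (ns : List (List Int)) (Q : List (Int × List Int)) (d : Int) :
    ∀ (acc : List (List Int)) (seen : PySem.Set (Int × List (Int × Int))),
    ns.foldl (pvStepA (d + 1)) (Q ++ acc.map (fun s => (d + 1, s)), seen) =
      ((Q ++ (ns.foldl pvStepB (acc, seen)).1.map (fun s => (d + 1, s)),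
        (ns.foldl pvStepB (acc, seen)).2)) := by
  induction ns with
  | nil => intro acc seen; rfl
  | cons n ns ih =>
    intro acc seen
    simp only [List.foldl_cons]
    by_cases hc : PySem.Set.contains seen (pvCanon n)
    · simp only [pvStepA, pvStepB, hc, if_true]
      exact ih acc seen
    · simp only [pvStepA, pvStepB, hc]
      have := ih (acc ++ [n]) (PySem.Set.add seen (pvCanon n))
      simpa [List.append_assoc] using this

theorem pvSafe_eq (state : List Int) (floor : Int) : pvSafeA state floor = pvSafeB state floor := by
  unfold pvSafeA pvSafeB
  have h1 : ∀ (l : List (Int × Int)) (b : Bool) (n : Int),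
      (l.foldl (fun (acc : Bool × Int) cg =>
        (acc.1 || (cg.1 == floor && cg.2 != floor), acc.2 + if cg.2 == floor then 1 else 0)) (b, n)).1
      = (b || l.any (fun cg => cg.1 == floor && cg.2 != floor)) := by
    intro l; induction l with
    | nil => intro b n; simp
    | cons cg l ih => intro b n; simp only [List.foldl_cons, ih, List.any_cons, Bool.or_assoc]
  have h2 : ∀ (l : List (Int × Int)) (b : Bool) (n : Int), 0 ≤ n →
      (decide (0 < (l.foldl (fun (acc : Bool × Int) cg =>
        (acc.1 || (cg.1 == floor && cg.2 != floor), acc.2 + if cg.2 == floor then 1 else 0)) (b, n)).2)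
      = (decide (0 < n) || l.any (fun cg => cg.2 == floor))) := by
    intro l; induction l with
    | nil => intro b n _; simp
    | cons cg l ih =>
      intro b n hn
      cases hg : (cg.2 == floor) with
      | true =>
        have h := ih (b || (cg.1 == floor && cg.2 != floor)) (n + 1) (by omega)
        have hp : decide (0 < n + 1) = true := by simp; omega
        simp only [List.foldl_cons, hg, if_true, List.any_cons, h, hp,
          Bool.true_or, Bool.or_true]
      | false =>
        have h := ih (b || (cg.1 == floor && cg.2 != floor)) n hn
        simp only [List.foldl_cons, hg, Bool.false_eq_true, ite_false, add_zero, List.any_cons, Bool.false_or, h]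
  simp only [h1, h2 _ _ 0 le_rfl]
  simp [Bool.and_comm]

theorem pvNexts_eq (state : List Int) : pvNextsA state = pvNextsB state := by
  unfold pvNextsA pvNextsB
  simp only [List.foldl_append, List.foldl_map]
  have key : ∀ (ns : List (List Int)) (cargo : List Nat),
      ([(-1 : Int), 1].foldl (fun ns d =>
        if (decide (d < 0) && decide (0 < (state.getD 0 0))) || (decide (0 < d) && decide ((state.getD 0 0) < 3)) then
          let st := pvMove state d cargo
          if pvSafeB st ((state.getD 0 0) + d) && pvSafeB st (state.getD 0 0) then ns ++ [st] else ns
        else ns) ns)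
      = (let ns1 := if 0 < (state.getD 0 0) then pvPushIfSafe (pvMove state (-1) cargo) ((state.getD 0 0) - 1) (state.getD 0 0) ns else ns
         if (state.getD 0 0) < 3 then pvPushIfSafe (pvMove state 1 cargo) ((state.getD 0 0) + 1) (state.getD 0 0) ns1 else ns1) := by
    intro ns cargo
    simp only [List.foldl_cons, List.foldl_nil, pvPushIfSafe, pvSafe_eq]
    norm_num
    split_ifs <;> simp_all [sub_eq_add_neg]
  congr 1
  · funext ns c
    have h := key ns [c.1, c.2]
    rw [h]
  · congr 1
    funext ns i
    have h := key ns [i]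
    rw [h]

theorem pvLoop_align : ∀ (fuel : Nat) (rest acc : List (List Int)) (d : Int)
    (seen : PySem.Set (Int × List (Int × Int))),
    pvALoop fuel (rest.map (fun s => (d, s)) ++ acc.map (fun s => (d + 1, s))) seen =
      match pvScan fuel rest with
      | .found => some d
      | .out => none
      | .clear f' =>
        pvLvLoop f' (pvExpandB rest (acc, seen)).1 (d + 1) (pvExpandB rest (acc, seen)).2 := by
  intro fuel
  induction fuel with
  | zero =>
    intro rest acc d seen
    cases rest with
    | nil =>
      cases acc with
      | nil => simp [pvALoop, pvScan, pvExpandB, pvLvLoop]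
      | cons a as => simp [pvALoop, pvScan, pvExpandB, pvLvLoop]
    | cons s r => simp [pvALoop, pvScan]
  | succ f ih =>
    have C1 : ∀ (s : List Int) (rest acc : List (List Int)) (d : Int)
        (seen : PySem.Set (Int × List (Int × Int))),
        pvALoop (f + 1) ((s :: rest).map (fun s => (d, s)) ++ acc.map (fun s => (d + 1, s))) seen =
          match pvScan (f + 1) (s :: rest) with
          | .found => some d
          | .out => none
          | .clear f' =>
            pvLvLoop f' (pvExpandB (s :: rest) (acc, seen)).1 (d + 1) (pvExpandB (s :: rest) (acc, seen)).2 := by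
      intro s rest acc d seen
      by_cases hd : pvDone s
      · simp [pvALoop, pvScan, hd]
      · simp only [List.map_cons, List.cons_append, pvALoop, pvScan, hd, Bool.false_eq_true,
          ite_false]
        rw [pvNexts_eq, pvExpand_align]
        have hE : pvExpandB (s :: rest) (acc, seen)
            = pvExpandB rest ((pvNextsB s).foldl pvStepB (acc, seen)) := by
          simp [pvExpandB]
        rw [hE]
        have := ih rest ((pvNextsB s).foldl pvStepB (acc, seen)).1 d
          ((pvNextsB s).foldl pvStepB (acc, seen)).2
        simpa using this
    intro rest acc d seen
    cases rest with
    | cons s r => exact C1 s r acc d seen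
    | nil =>
      cases acc with
      | nil => simp [pvALoop, pvScan, pvExpandB, pvLvLoop]
      | cons a as =>
        have h := C1 a as [] (d + 1) seen
        simp only [List.map_nil, List.append_nil, List.nil_append] at h ⊢
        rw [h]
        exact (pvLvLoop_cons (f + 1) a as (d + 1) seen).symm

-- ===== the bridge pvLvLoop = pvFixLoop: the old part of the discovered set
-- contributes nothing to a round, because all its successors' keys are seen =====

-- every successor key of every member of S is already in seen
def pvCovered (S : List (List Int)) (seen : PySem.Set (Int × List (Int × Int))) : Prop :=
  ∀ s ∈ S, ∀ n ∈ pvNextsB s, PySem.Set.contains seen (pvCanon n) = true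

theorem pvStepB_mono (acc : List (List Int) × PySem.Set (Int × List (Int × Int)))
    (n : List Int) (k : Int × List (Int × Int)) (h : PySem.Set.contains acc.2 k = true) :
    PySem.Set.contains (pvStepB acc n).2 k = true := by
  by_cases hc : PySem.Set.contains acc.2 (pvCanon n) = true
  · simp only [pvStepB]; rw [if_pos hc]; exact h
  · simp only [pvStepB]; rw [if_neg hc]
    rw [PySem.Set.contains_iff] at h ⊢
    exact (PySem.Set.mem_add _ _ _).mpr (Or.inl h)

theorem pvFoldB_mono (ns : List (List Int)) :
    ∀ (acc : List (List Int) × PySem.Set (Int × List (Int × Int)))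
      (k : Int × List (Int × Int)), PySem.Set.contains acc.2 k = true →
    PySem.Set.contains ((ns.foldl pvStepB acc).2) k = true := by
  induction ns with
  | nil => intro acc k h; exact h
  | cons n ns ih => intro acc k h; exact ih _ k (pvStepB_mono acc n k h)

theorem pvExpandB_mono (S : List (List Int)) :
    ∀ (acc : List (List Int) × PySem.Set (Int × List (Int × Int)))
      (k : Int × List (Int × Int)), PySem.Set.contains acc.2 k = true →
    PySem.Set.contains ((pvExpandB S acc).2) k = true := by
  induction S with
  | nil => intro acc k h; exact h
  | cons s S ih =>
    intro acc k h
    exact ih _ k (pvFoldB_mono (pvNextsB s) acc k h)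

theorem pvFoldB_covers (ns : List (List Int)) :
    ∀ (acc : List (List Int) × PySem.Set (Int × List (Int × Int))),
    ∀ n ∈ ns, PySem.Set.contains ((ns.foldl pvStepB acc).2) (pvCanon n) = true := by
  induction ns with
  | nil => intro acc n hn; cases hn
  | cons m ns ih =>
    intro acc n hn
    rw [List.foldl_cons]
    rcases List.mem_cons.mp hn with hn | hn
    · subst hn
      apply pvFoldB_mono
      by_cases hc : PySem.Set.contains acc.2 (pvCanon n) = true
      · simp only [pvStepB]; rw [if_pos hc]; exact hc
      · simp only [pvStepB]; rw [if_neg hc]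
        rw [PySem.Set.contains_iff]
        exact (PySem.Set.mem_add _ _ _).mpr (Or.inr rfl)
    · exact ih _ n hn

theorem pvFoldB_skip (ns : List (List Int)) :
    ∀ (acc : List (List Int) × PySem.Set (Int × List (Int × Int))),
    (∀ n ∈ ns, PySem.Set.contains acc.2 (pvCanon n) = true) →
    ns.foldl pvStepB acc = acc := by
  induction ns with
  | nil => intro acc _; rfl
  | cons n ns ih =>
    intro acc h
    have h1 : pvStepB acc n = acc := by
      simp only [pvStepB]; rw [if_pos (h n (List.mem_cons_self ..))]
    rw [List.foldl_cons, h1]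
    exact ih acc (fun m hm => h m (List.mem_cons_of_mem _ hm))

theorem pvExpandB_skip (S : List (List Int))
    (acc : List (List Int) × PySem.Set (Int × List (Int × Int)))
    (h : pvCovered S acc.2) : pvExpandB S acc = acc := by
  induction S with
  | nil => rfl
  | cons s S ih =>
    unfold pvExpandB
    rw [List.foldl_cons, pvFoldB_skip _ _ (h s (List.mem_cons_self ..))]
    exact ih (fun t ht => h t (List.mem_cons_of_mem _ ht))

theorem pvExpandB_covers (S : List (List Int)) :
    ∀ (acc : List (List Int) × PySem.Set (Int × List (Int × Int))),
    ∀ s ∈ S, ∀ n ∈ pvNextsB s,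
      PySem.Set.contains ((pvExpandB S acc).2) (pvCanon n) = true := by
  induction S with
  | nil => intro acc s hs; cases hs
  | cons t S ih =>
    intro acc s hs n hn
    rcases List.mem_cons.mp hs with hs | hs
    · subst hs
      exact pvExpandB_mono S _ _ (pvFoldB_covers (pvNextsB s) acc n hn)
    · exact ih _ s hs n hn

-- old prefix of the discovered set is a no-op in the round expansion
theorem pvExpandB_append (S newGen : List (List Int))
    (seen : PySem.Set (Int × List (Int × Int))) (h : pvCovered S seen) :
    pvExpandB (S ++ newGen) ([], seen) = pvExpandB newGen ([], seen) := by
  unfold pvExpandB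
  rw [List.foldl_append]
  have := pvExpandB_skip S ([], seen) h
  unfold pvExpandB at this
  rw [this]

theorem pvLv_fix (fuel : Nat) : ∀ (S newGen : List (List Int)) (depth : Int)
    (seen : PySem.Set (Int × List (Int × Int))), pvCovered S seen →
    pvLvLoop fuel newGen depth seen = pvFixLoop fuel S newGen depth seen := by
  induction fuel using Nat.strong_induction_on with
  | _ fuel ih =>
    intro S newGen depth seen hcov
    cases newGen with
    | nil => rw [pvLvLoop, pvFixLoop]
    | cons s rest =>
      rw [pvLvLoop, pvFixLoop]
      cases h : pvScan fuel (s :: rest) with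
      | found => rfl
      | out => rfl
      | clear f' =>
        simp only
        have hE : pvExpandB (S ++ s :: rest) ([], seen) = pvExpandB (s :: rest) ([], seen) :=
          pvExpandB_append S (s :: rest) seen hcov
        rw [hE]
        apply ih f' (pvScan_clear_lt fuel s rest f' h)
        intro t ht n hn
        rcases List.mem_append.mp ht with ht | ht
        · exact pvExpandB_mono (s :: rest) ([], seen) _ (hcov t ht n hn)
        · exact pvExpandB_covers (s :: rest) ([], seen) t ht n hn

-- ===== VERDICT (by name: the statement is the Claim_ definition above) =====
theorem solve_spec : Claim_equal_solve := by
  intro puzzle _ _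
  unfold Spec_solve solve solve_alt
  have h := pvLoop_align (pvFuel puzzle) [puzzle] [] 0 PySem.Set.empty
  simp only [List.map_cons, List.map_nil, List.append_nil] at h
  rw [h, ← pvLvLoop_cons]
  exact pvLv_fix (pvFuel puzzle) [] [puzzle] 0 PySem.Set.empty (fun t ht => nomatch ht)
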